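-- pv_equiv track=rewrite | github.com/AumitLeon/advent-of-code | 2025/day_06/solution.py | solution_part_2
-- ===== SOURCE A (Python) =====
-- from math import prod
--
-- def transpose_matrix(matrix: list[list[str]], cast_int: bool = True) -> list[list[str | int]]:
--     transposed_matrix = []
--     num_rows = len(matrix)
--     num_cols = len(matrix[0])
--     for i in range(num_cols):
--         problem = []
--         for j in range(num_rows):
--             if matrix[j][i] in ("+", "*"):
--                 problem.append(matrix[j][i])
--             else:
--                 if cast_int:
--                     problem.append(int(matrix[j][i]))
--                 else:
--                     problem.append(matrix[j][i])
--
--         transposed_matrix.append(problem)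
--     return transposed_matrix
--
-- def split_nums(operand_widths: list[int], raw_lines: list[str]) -> list[list[str]]:
--     operands = []
--     for line in raw_lines:
--         curr_operands = []
--         curr_line_idx = 0
--         for width in operand_widths:
--             curr_operands.append(line[curr_line_idx : curr_line_idx + width])
--             curr_line_idx += width + 1
--         operands.append(curr_operands)
--     return operands
--
-- def solution_part_2(operators: list[str], raw_lines: list[str], operand_widths: list[int]) -> int:
--     total = 0
--     matrix = split_nums(operand_widths, raw_lines)
--     transposed_matrix = transpose_matrix(matrix, False)
--
--     for problem, operator, operand_width in zip(transposed_matrix, operators, operand_widths):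
--         problem_answer = 0
--         new_operands = []
--         newlined_stripped_problem = [val.replace("\n", "") for val in problem]
--         for i in range(operand_width - 1, -1, -1):
--             num = ""
--             for operand in newlined_stripped_problem:
--                 if operand[i].isdigit():
--                     num += operand[i]
--
--             new_operands.append(int(num))
--
--         if operator == "*":
--             problem_answer = prod(new_operands)
--         else:
--             problem_answer = sum(new_operands)
--         total += problem_answer
--     return total
-- ===== SOURCE B (Python) =====
-- from math import prod
--
-- def solution_part_2(operators, raw_lines, operand_widths):
--     # Column layout: for each zipped (operator, width) remember the absolute
--     # character indices of its field; a single row-major sweep over the raw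
--     # lines then fills one digit buffer per character index (no intermediate
--     # matrix, no transpose, no slicing).
--     cols = []
--     pos = 0
--     for op, w in zip(operators, operand_widths):
--         cols.append((op, list(range(pos, pos + w))))
--         pos += w + 1
--     buf = {j: "" for _, idxs in cols for j in idxs}
--     for line in raw_lines:
--         for j in buf:
--             c = line[j]
--             if c.isdigit():
--                 buf[j] += c
--     total = 0
--     for op, idxs in cols:
--         nums = [int(buf[j]) for j in idxs]
--         total += prod(nums) if op == "*" else sum(nums)
--     return total
-- ===== Notes on version B (the rewrite author's own statement) =====
-- stated objective: alternative
-- what changed: Replaces A's build-matrix + transpose + per-column digit-string rescan pipeline by a single row-major sweep over the raw lines that appends each digit into a dictionary of per-character-index buffers (precomputed from the column layout), then combines the buffers per operator; no intermediate matrix, no transpose, no slicing.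
import Mathlib
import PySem

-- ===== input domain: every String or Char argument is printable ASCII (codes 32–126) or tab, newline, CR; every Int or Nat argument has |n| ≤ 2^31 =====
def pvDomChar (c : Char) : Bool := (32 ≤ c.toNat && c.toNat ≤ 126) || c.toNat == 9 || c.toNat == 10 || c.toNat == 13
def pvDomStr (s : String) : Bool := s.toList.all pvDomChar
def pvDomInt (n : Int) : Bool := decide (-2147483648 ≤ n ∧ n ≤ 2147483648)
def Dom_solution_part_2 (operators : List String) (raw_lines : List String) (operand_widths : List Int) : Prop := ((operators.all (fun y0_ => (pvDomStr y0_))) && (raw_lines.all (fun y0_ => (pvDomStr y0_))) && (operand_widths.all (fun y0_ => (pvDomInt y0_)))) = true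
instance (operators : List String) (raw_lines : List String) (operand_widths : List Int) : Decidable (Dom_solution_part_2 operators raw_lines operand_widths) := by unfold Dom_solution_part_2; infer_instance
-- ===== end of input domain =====

-- B replaces A's build-matrix/transpose/per-column-rescan pipeline by one row-major sweep over
-- the raw lines that fills a dictionary of per-character-index digit buffers (objective: alternative).

-- ===== PORT A =====

-- split_nums inner loop: state (curr_operands, curr_line_idx)
def pvSplitLine (operand_widths : List Int) (line : List Char) : List (List Char) × Int :=
  operand_widths.foldl
    (fun (p : List (List Char) × Int) width =>
      (p.1 ++ [PySem.List.slice line (some p.2) (some (p.2 + width))], p.2 + width + 1))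
    ([], 0)

def pvSplitNums (operand_widths : List Int) (raw_lines : List (List Char)) : List (List (List Char)) :=
  raw_lines.foldl (fun operands line => operands ++ [(pvSplitLine operand_widths line).1]) []

-- transpose_matrix with cast_int = False (both branches of A's 'if' append the element unchanged)
def pvTranspose (matrix : List (List (List Char))) : List (List (List Char)) :=
  let num_rows : Int := (matrix.length : Int)
  let num_cols : Int := ((((PySem.List.pyGet? matrix 0).getD []).length : Nat) : Int)  -- matrix[0]: IndexError on [] excluded by Pre_
  (PySem.List.pyRange 0 num_cols).foldl
    (fun tm i =>
      let problem := (PySem.List.pyRange 0 num_rows).foldl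
        (fun problem j =>
          let v := PySem.List.pyGetD (PySem.List.pyGetD matrix j []) i []
          if v = ['+'] ∨ v = ['*'] then problem ++ [v] else problem ++ [v])
        []
      tm ++ [problem])
    []

def solution_part_2 (operators : List String) (raw_lines : List String) (operand_widths : List Int) : Int :=
  let matrix := pvSplitNums operand_widths (raw_lines.map String.toList)
  let transposed_matrix := pvTranspose matrix
  ((transposed_matrix.zip operators).zip operand_widths).foldl
    (fun total x =>
      let problem := x.1.1
      let operator := x.1.2
      let operand_width := x.2
      let newlined_stripped_problem := problem.map (fun v => PySem.Chars.replace v ['\n'] [])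
      let new_operands := (PySem.List.pyRange (operand_width - 1) (-1) (-1)).foldl
        (fun ops i =>
          let num := newlined_stripped_problem.foldl
            (fun num operand =>
              match PySem.List.pyGet? operand i with   -- none = IndexError, excluded by Pre_
              | some c => if PySem.Chars.isdigit c then num ++ [c] else num
              | none => num)
            ([] : List Char)
          ops ++ [(PySem.Int.ofChars? num).getD 0])    -- none = int('') ValueError, excluded by Pre_
        ([] : List Int)
      let problem_answer := if operator = "*" then new_operands.prod else new_operands.sum
      total + problem_answer)
    0

-- ===== PORT B =====

def solution_part_2_alt (operators : List String) (raw_lines : List String) (operand_widths : List Int) : Int :=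
  -- cols: for each zipped (operator, width), the absolute character indices of its field
  let cols := ((operators.zip operand_widths).foldl
      (fun (p : List (String × List Int) × Int) ow =>
        (p.1 ++ [(ow.1, PySem.List.pyRange p.2 (p.2 + ow.2))], p.2 + ow.2 + 1))
      (([] : List (String × List Int)), (0 : Int))).1
  -- buf = {j: "" for _, idxs in cols for j in idxs}
  let buf0 : PySem.Dict Int (List Char) :=
    cols.foldl (fun d col => col.2.foldl (fun d j => d.insert j []) d) PySem.Dict.empty
  -- one row-major sweep over the raw lines, appending each digit to its index's buffer
  let buf := raw_lines.foldl
      (fun (b : PySem.Dict Int (List Char)) line =>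
        b.keys.foldl
          (fun (b : PySem.Dict Int (List Char)) j =>
            match PySem.List.pyGet? line.toList j with   -- none = IndexError, excluded by Pre_
            | some c => if PySem.Chars.isdigit c then b.modify j [] (fun s => s ++ [c]) else b
            | none => b)
          b)
      buf0
  cols.foldl
    (fun total col =>
      let nums := col.2.map (fun j => (PySem.Int.ofChars? (buf.getD j [])).getD 0)  -- none = int('') ValueError, excluded by Pre_
      total + (if col.1 = "*" then nums.prod else nums.sum))
    0

-- ===== PRECONDITION & SPEC =====

-- per-column check at offset c, width w: nothing to check for w ≤ 0 (A's inner loop is empty);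
-- otherwise every line's field line[c:c+w] has exactly w characters none of which is '\n'
-- (else A's field[i] after newline-stripping raises IndexError), and every position of the
-- column holds a digit in at least one line (else A's int('') raises ValueError)
def pvColsOK : List String → List Int → Int → List String → Bool
  | [], _, _, _ => true
  | _, [], _, _ => true
  | _ :: ops, w :: ws, c, lines =>
      (decide (w ≤ 0) ||
        (lines.all (fun line =>
            decide ((PySem.List.slice line.toList (some c) (some (c + w))).length = w.toNat) &&
            decide ('\n' ∉ PySem.List.slice line.toList (some c) (some (c + w)))) &&
         (PySem.List.pyRange 0 w).all (fun i =>
            lines.any (fun line =>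
              ((PySem.List.pyGet? (PySem.List.slice line.toList (some c) (some (c + w))) i).map
                PySem.Chars.isdigit).getD false))))
      && pvColsOK ops ws (c + w + 1) lines

-- Pre_ excludes exactly the inputs on which Python A raises: empty raw_lines (IndexError on
-- matrix[0]), a column position missing from some line's stripped field (IndexError), or a
-- column position with no digit in any line (int('') ValueError).
def Pre_solution_part_2 (operators : List String) (raw_lines : List String) (operand_widths : List Int) : Prop :=
  raw_lines ≠ [] ∧ pvColsOK operators operand_widths 0 raw_lines = true

instance (operators : List String) (raw_lines : List String) (operand_widths : List Int) : Decidable (Pre_solution_part_2 operators raw_lines operand_widths) := by unfold Pre_solution_part_2; infer_instance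

def pvWitness_solution_part_2 : List String × List String × List Int := (["+", "*"], ["12 34", "56 78"], [2, 2])

def Spec_solution_part_2 (operators : List String) (raw_lines : List String) (operand_widths : List Int) (out : Int) : Prop := out = solution_part_2_alt operators raw_lines operand_widths
instance (operators : List String) (raw_lines : List String) (operand_widths : List Int) (out : Int) : Decidable (Spec_solution_part_2 operators raw_lines operand_widths out) := by unfold Spec_solution_part_2; infer_instance

-- ===== CLAIM (what is proved, stated in full; the proofs are below) =====
def Claim_equal_solution_part_2 : Prop := ∀ (operators : List String) (raw_lines : List String) (operand_widths : List Int), Dom_solution_part_2 operators raw_lines operand_widths → Pre_solution_part_2 operators raw_lines operand_widths → Spec_solution_part_2 operators raw_lines operand_widths (solution_part_2 operators raw_lines operand_widths)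

-- ===== LEMMAS AND PROOFS =====

-- proof-only intermediate: the slice-based column-at-a-time form both programs reduce to
def pvStarts (operand_widths : List Int) : List Int :=
  (operand_widths.foldl (fun (p : List Int × Int) w => (p.1 ++ [p.2], p.2 + w + 1)) ([], 0)).1

-- per-column contribution of the slice-based form
def pvColB (raw_lines : List String) (x : (String × Int) × Int) : Int :=
  let op := x.1.1
  let start := x.1.2
  let w := x.2
  let fields := raw_lines.map
    (fun line => PySem.Chars.replace (PySem.List.slice line.toList (some start) (some (start + w))) ['\n'] [])
  let nums := (PySem.List.pyRange 0 w).map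
    (fun i =>
      (PySem.Int.ofChars? (fields.filterMap
        (fun f =>
          match PySem.List.pyGet? f i with
          | some c => if PySem.Chars.isdigit c then some c else none
          | none => none))).getD 0)
  if op = "*" then nums.prod else nums.sum

def pvAltS (operators : List String) (raw_lines : List String) (operand_widths : List Int) : Int :=
  ((operators.zip (pvStarts operand_widths)).zip operand_widths).foldl
    (fun total x => total + pvColB raw_lines x) 0

-- the field substrings of one line, with their start offsets
def pvOffs : List Int → Int → List Int
  | [], _ => []
  | w :: ws, c => c :: pvOffs ws (c + w + 1)

def pvFieldsFrom (line : List Char) : List Int → Int → List (List Char)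
  | [], _ => []
  | w :: ws, c => PySem.List.slice line (some c) (some (c + w)) :: pvFieldsFrom line ws (c + w + 1)

theorem pvSplitLine_foldl (line : List Char) (ws : List Int) :
    ∀ (acc : List (List Char)) (c : Int),
      (ws.foldl (fun (p : List (List Char) × Int) width =>
        (p.1 ++ [PySem.List.slice line (some p.2) (some (p.2 + width))], p.2 + width + 1)) (acc, c)).1
      = acc ++ pvFieldsFrom line ws c := by
  induction ws with
  | nil => intro acc c; simp [pvFieldsFrom]
  | cons w ws ih =>
      intro acc c
      simp only [List.foldl_cons, pvFieldsFrom]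
      rw [ih]
      simp

theorem pvStarts_foldl (ws : List Int) :
    ∀ (acc : List Int) (c : Int),
      (ws.foldl (fun (p : List Int × Int) w => (p.1 ++ [p.2], p.2 + w + 1)) (acc, c)).1
      = acc ++ pvOffs ws c := by
  induction ws with
  | nil => intro acc c; simp [pvOffs]
  | cons w ws ih =>
      intro acc c
      simp only [List.foldl_cons, pvOffs]
      rw [ih]
      simp

theorem pvFieldsFrom_length (line : List Char) (ws : List Int) (c : Int) :
    (pvFieldsFrom line ws c).length = ws.length := by
  induction ws generalizing c with
  | nil => simp [pvFieldsFrom]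
  | cons w ws ih => simp [pvFieldsFrom, ih]

theorem pvOffs_length (ws : List Int) (c : Int) : (pvOffs ws c).length = ws.length := by
  induction ws generalizing c with
  | nil => simp [pvOffs]
  | cons w ws ih => simp [pvOffs, ih]

theorem pvFieldsFrom_getElem (line : List Char) (ws : List Int) (c : Int) (k : Nat)
    (hk : k < ws.length) :
    (pvFieldsFrom line ws c)[k]'(by rw [pvFieldsFrom_length]; exact hk)
      = PySem.List.slice line (some ((pvOffs ws c)[k]'(by rw [pvOffs_length]; exact hk)))
          (some ((pvOffs ws c)[k]'(by rw [pvOffs_length]; exact hk) + ws[k])) := by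
  induction ws generalizing c k with
  | nil => simp at hk
  | cons w ws ih =>
      cases k with
      | zero => simp [pvFieldsFrom, pvOffs]
      | succ k => simpa [pvFieldsFrom, pvOffs] using ih (c + w + 1) k (by simpa using hk)

-- desc range = reverse of asc range
theorem pvRange_desc (w : Int) :
    PySem.List.pyRange (w - 1) (-1) (-1) = (PySem.List.pyRange 0 w).reverse := by
  by_cases hw : 0 < w
  · have hd : PySem.List.pyRange (w - 1) (-1) (-1)
        = List.map (fun k : Nat => (w - 1) + (-1) * (k : Int)) (List.range w.toNat) := by
      unfold PySem.List.pyRange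
      norm_num [List.flatMap_singleton', hw]
    have ha : PySem.List.pyRange 0 w
        = List.map (fun k : Nat => ((k : Nat) : Int)) (List.range w.toNat) := by
      unfold PySem.List.pyRange
      norm_num [List.flatMap_singleton', hw]
    rw [hd, ha]
    apply List.ext_getElem
    · simp
    · intro k h1 h2
      simp only [List.getElem_map, List.getElem_reverse, List.length_map, List.getElem_range, List.length_range]
      simp only [List.length_map, List.length_range] at h1
      rw [Int.natCast_sub (by omega), Int.natCast_sub (by omega)]
      push_cast
      omega
  · have hd : PySem.List.pyRange (w - 1) (-1) (-1) = [] := by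
      unfold PySem.List.pyRange
      norm_num
      omega
    have ha : PySem.List.pyRange 0 w = [] := by
      unfold PySem.List.pyRange
      norm_num
      omega
    simp [hd, ha]

-- A's digit-collecting foldl is a filterMap
theorem pvNum_foldl (i : Int) (l : List (List Char)) (acc : List Char) :
    (l.foldl (fun num operand =>
      match PySem.List.pyGet? operand i with
      | some c => if PySem.Chars.isdigit c then num ++ [c] else num
      | none => num) acc)
    = acc ++ l.filterMap (fun f =>
        match PySem.List.pyGet? f i with
        | some c => if PySem.Chars.isdigit c then some c else none
        | none => none) := by
  induction l generalizing acc with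
  | nil => simp
  | cons f l ih =>
      simp only [List.foldl_cons, List.filterMap_cons]
      cases h : PySem.List.pyGet? f i with
      | none => simp [ih]
      | some c =>
          by_cases hd : PySem.Chars.isdigit c
          · simp [hd, ih]
          · simp [hd, ih]

theorem pvSplitNums_eq (ws : List Int) (ls : List (List Char)) :
    pvSplitNums ws ls = ls.map (fun l => pvFieldsFrom l ws 0) := by
  unfold pvSplitNums
  rw [PySem.List.foldl_append_singleton_eq_map]
  simp [pvSplitLine, pvSplitLine_foldl]

theorem pvStarts_eq (ws : List Int) : pvStarts ws = pvOffs ws 0 := by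
  unfold pvStarts
  rw [pvStarts_foldl]
  simp

theorem pvTranspose_eq (matrix : List (List (List Char))) :
    pvTranspose matrix
      = (List.range (((PySem.List.pyGet? matrix 0).getD []).length)).map
          (fun (k : Nat) => matrix.map (fun row => PySem.List.pyGetD row (k : Int) [])) := by
  unfold pvTranspose
  simp only [ite_self]
  rw [PySem.List.foldl_append_singleton_eq_map]
  rw [PySem.List.pyRange_zero_natCast (((PySem.List.pyGet? matrix 0).getD []).length)]
  rw [List.map_map, List.nil_append]
  apply List.map_congr_left
  intro k _
  simp only [Function.comp_def]
  rw [PySem.List.foldl_append_singleton_eq_map]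
  rw [PySem.List.pyRange_zero_natCast (matrix.length)]
  have h1 : (fun j => PySem.List.pyGetD (PySem.List.pyGetD matrix j []) ((k : Nat) : Int) [])
      = (fun row => PySem.List.pyGetD row ((k : Nat) : Int) []) ∘ (fun j => PySem.List.pyGetD matrix j []) := rfl
  rw [h1, ← List.map_map]
  rw [← PySem.List.pyRange_zero_natCast (matrix.length)]
  have h2 : ((matrix.length : Nat) : Int) = PySem.List.len matrix := rfl
  rw [h2, PySem.List.map_pyGetD_pyRange_zero]
  simp

-- per-column contribution of A's main loop (proof-only)
def pvColA (x : (List (List Char) × String) × Int) : Int :=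
  let problem := x.1.1
  let operator := x.1.2
  let operand_width := x.2
  let newlined_stripped_problem := problem.map (fun v => PySem.Chars.replace v ['\n'] [])
  let new_operands := (PySem.List.pyRange (operand_width - 1) (-1) (-1)).foldl
    (fun ops i =>
      let num := newlined_stripped_problem.foldl
        (fun num operand =>
          match PySem.List.pyGet? operand i with
          | some c => if PySem.Chars.isdigit c then num ++ [c] else num
          | none => num)
        ([] : List Char)
      ops ++ [(PySem.Int.ofChars? num).getD 0])
    ([] : List Int)
  if operator = "*" then new_operands.prod else new_operands.sum

theorem pvA_as_sum (operators : List String) (raw_lines : List String) (operand_widths : List Int) :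
    solution_part_2 operators raw_lines operand_widths
      = (((((pvTranspose (pvSplitNums operand_widths (raw_lines.map String.toList))).zip operators).zip operand_widths)).map pvColA).sum := by
  rw [show solution_part_2 operators raw_lines operand_widths
      = ((((pvTranspose (pvSplitNums operand_widths (raw_lines.map String.toList))).zip operators).zip operand_widths)).foldl (fun total x => total + pvColA x) 0 from rfl]
  rw [PySem.List.foldl_add]
  simp

theorem pvS_as_sum (operators : List String) (raw_lines : List String) (operand_widths : List Int) :
    pvAltS operators raw_lines operand_widths
      = ((((operators.zip (pvStarts operand_widths)).zip operand_widths)).map (pvColB raw_lines)).sum := by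
  unfold pvAltS
  rw [PySem.List.foldl_add]
  simp

theorem pvCol_eq (raw_lines : List String) (op : String) (st w : Int) :
    pvColA ((raw_lines.map (fun line => PySem.List.slice line.toList (some st) (some (st + w))), op), w)
      = pvColB raw_lines ((op, st), w) := by
  simp only [pvColA, pvColB, List.map_map, Function.comp_def]
  rw [PySem.List.foldl_append_singleton_eq_map
    (f := fun i => (PySem.Int.ofChars? ((raw_lines.map (fun line => PySem.Chars.replace (PySem.List.slice line.toList (some st) (some (st + w))) ['\n'] [])).foldl
        (fun num operand =>
          match PySem.List.pyGet? operand i with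
          | some c => if PySem.Chars.isdigit c then num ++ [c] else num
          | none => num)
        ([] : List Char))).getD 0)]
  simp only [pvNum_foldl, List.nil_append]
  rw [pvRange_desc, List.map_reverse]
  by_cases h : op = "*" <;> simp [h]

-- A reduces to the slice-based column form (needs only a nonempty line list)
theorem pvA_eq_S (operators : List String) (raw_lines : List String) (operand_widths : List Int)
    (hne : raw_lines ≠ []) :
    solution_part_2 operators raw_lines operand_widths = pvAltS operators raw_lines operand_widths := by
  obtain ⟨l0, ls, rfl⟩ := List.exists_cons_of_ne_nil hne
  rw [pvA_as_sum, pvS_as_sum]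
  congr 1
  rw [pvSplitNums_eq, pvTranspose_eq]
  have hm : ((PySem.List.pyGet? (((l0 :: ls).map String.toList).map (fun l => pvFieldsFrom l operand_widths 0)) 0).getD []).length = operand_widths.length := by
    simp [PySem.List.pyGet?, PySem.List.pyIdx?, pvFieldsFrom_length]
  rw [hm]
  apply List.ext_getElem
  · simp [pvStarts_eq, pvOffs_length]
    omega
  · intro k hk1 hk2
    simp only [List.length_map, List.length_zip, List.length_range] at hk1
    have hkw : k < operand_widths.length := by omega
    have hko : k < operators.length := by omega
    simp only [List.getElem_map, List.getElem_zip, List.getElem_range]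
    have hcol : (((l0 :: ls).map String.toList).map (fun l => pvFieldsFrom l operand_widths 0)).map
          (fun row => PySem.List.pyGetD row ((k : Nat) : Int) [])
        = (l0 :: ls).map (fun line => PySem.List.slice line.toList
            (some ((pvOffs operand_widths 0)[k]'(by rw [pvOffs_length]; exact hkw)))
            (some ((pvOffs operand_widths 0)[k]'(by rw [pvOffs_length]; exact hkw) + operand_widths[k]))) := by
      simp only [List.map_map]
      apply List.map_congr_left
      intro line _
      simp only [Function.comp_def]
      rw [PySem.List.pyGetD_eq_getElem _ _ (by positivity) (by rw [pvFieldsFrom_length]; exact_mod_cast hkw)]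
      simp only [Int.toNat_natCast]
      exact pvFieldsFrom_getElem line.toList operand_widths 0 k hkw
    rw [hcol]
    simp only [pvStarts_eq]
    exact pvCol_eq (l0 :: ls) (operators[k]) _ (operand_widths[k])

-- ===== B-side proof machinery =====

-- the digit contributed by one line at absolute character index j
def pvDigitAt (line : String) (j : Int) : Option Char :=
  match PySem.List.pyGet? line.toList j with
  | some c => if PySem.Chars.isdigit c then some c else none
  | none => none

-- per-column contribution of B's final loop, with the buffers already characterised
def pvColG (raw_lines : List String) (col : String × List Int) : Int :=
  let nums := col.2.map (fun j =>
    (PySem.Int.ofChars? (raw_lines.filterMap (fun line => pvDigitAt line j))).getD 0)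
  if col.1 = "*" then nums.prod else nums.sum

-- the column layout B builds
def pvCols : List (String × Int) → Int → List (String × List Int)
  | [], _ => []
  | ow :: rest, c => (ow.1, PySem.List.pyRange c (c + ow.2)) :: pvCols rest (c + ow.2 + 1)

theorem pvCols_foldl (l : List (String × Int)) :
    ∀ (acc : List (String × List Int)) (c : Int),
      (l.foldl (fun (p : List (String × List Int) × Int) ow =>
        (p.1 ++ [(ow.1, PySem.List.pyRange p.2 (p.2 + ow.2))], p.2 + ow.2 + 1)) (acc, c)).1
      = acc ++ pvCols l c := by
  induction l with
  | nil => intro acc c; simp [pvCols]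
  | cons ow rest ih =>
      intro acc c
      simp only [List.foldl_cons, pvCols]
      rw [ih]
      simp

-- buffer-initialisation facts
theorem pvIns_getD (idxs : List Int) :
    ∀ (d : PySem.Dict Int (List Char)), (∀ j, d.getD j [] = []) →
      ∀ j, (idxs.foldl (fun d j => d.insert j []) d).getD j [] = [] := by
  induction idxs with
  | nil => intro d hd j; exact hd j
  | cons j0 idxs ih =>
      intro d hd j
      simp only [List.foldl_cons]
      refine ih _ ?_ j
      intro j'
      rw [PySem.Dict.getD_insert]
      split_ifs with h
      · rfl
      · exact hd j'

theorem pvBuf0_getD (cols : List (String × List Int)) :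
    ∀ (d : PySem.Dict Int (List Char)), (∀ j, d.getD j [] = []) →
      ∀ j, (cols.foldl (fun d col => col.2.foldl (fun d j => d.insert j []) d) d).getD j [] = [] := by
  induction cols with
  | nil => intro d hd j; exact hd j
  | cons col cols ih =>
      intro d hd j
      simp only [List.foldl_cons]
      exact ih _ (pvIns_getD col.2 d hd) j

theorem pvBuf0_nodup (cols : List (String × List Int)) :
    ∀ (d : PySem.Dict Int (List Char)), d.keys.Nodup →
      (cols.foldl (fun d col => col.2.foldl (fun d j => d.insert j []) d) d).keys.Nodup := by
  induction cols with
  | nil => intro d hd; exact hd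
  | cons col cols ih =>
      intro d hd
      simp only [List.foldl_cons]
      exact ih _ (PySem.Dict.nodup_keys_foldl_insert col.2 (fun _ _ => []) d hd)

theorem pvIns_mem_mono (idxs : List Int) :
    ∀ (d : PySem.Dict Int (List Char)) (j : Int), j ∈ d.keys →
      j ∈ (idxs.foldl (fun d j => d.insert j []) d).keys := by
  induction idxs with
  | nil => intro d j h; exact h
  | cons j0 idxs ih =>
      intro d j h
      simp only [List.foldl_cons]
      exact ih _ j ((PySem.Dict.mem_keys_insert d j0 j []).mpr (Or.inr h))

theorem pvIns_mem (idxs : List Int) :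
    ∀ (d : PySem.Dict Int (List Char)) (j : Int), j ∈ idxs →
      j ∈ (idxs.foldl (fun d j => d.insert j []) d).keys := by
  induction idxs with
  | nil => intro d j h; simp at h
  | cons j0 idxs ih =>
      intro d j h
      simp only [List.foldl_cons]
      rcases List.mem_cons.mp h with h | h
      · exact pvIns_mem_mono idxs _ j ((PySem.Dict.mem_keys_insert d j0 j []).mpr (Or.inl h))
      · exact ih _ j h

theorem pvBuf0_mem_mono (cols : List (String × List Int)) :
    ∀ (d : PySem.Dict Int (List Char)) (j : Int), j ∈ d.keys →
      j ∈ (cols.foldl (fun d col => col.2.foldl (fun d j => d.insert j []) d) d).keys := by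
  induction cols with
  | nil => intro d j h; exact h
  | cons c0 cols ih =>
      intro d j h
      simp only [List.foldl_cons]
      exact ih _ j (pvIns_mem_mono c0.2 d j h)

theorem pvBuf0_mem (cols : List (String × List Int)) :
    ∀ (d : PySem.Dict Int (List Char)) (col : String × List Int) (j : Int),
      col ∈ cols → j ∈ col.2 →
      j ∈ (cols.foldl (fun d col => col.2.foldl (fun d j => d.insert j []) d) d).keys := by
  induction cols with
  | nil => intro d col j h _; simp at h
  | cons c0 cols ih =>
      intro d col j hc hj
      simp only [List.foldl_cons]
      rcases List.mem_cons.mp hc with rfl | hc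
      · exact pvBuf0_mem_mono cols _ j (pvIns_mem col.2 d j hj)
      · exact ih _ col j hc hj

-- one line of the row-major sweep
theorem pvInner (line : String) (ks : List Int) :
    ∀ (b : PySem.Dict Int (List Char)), ks.Nodup → (∀ j ∈ ks, j ∈ b.keys) →
      (ks.foldl (fun (b : PySem.Dict Int (List Char)) j =>
          match PySem.List.pyGet? line.toList j with
          | some c => if PySem.Chars.isdigit c then b.modify j [] (fun s => s ++ [c]) else b
          | none => b) b).keys = b.keys
      ∧ ∀ j, (ks.foldl (fun (b : PySem.Dict Int (List Char)) j =>
          match PySem.List.pyGet? line.toList j with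
          | some c => if PySem.Chars.isdigit c then b.modify j [] (fun s => s ++ [c]) else b
          | none => b) b).getD j []
          = if j ∈ ks then b.getD j [] ++ (pvDigitAt line j).toList else b.getD j [] := by
  induction ks with
  | nil => intro b _ _; exact ⟨rfl, by intro j; simp⟩
  | cons j0 ks ih =>
      intro b hnd hmem
      have hj0 : j0 ∈ b.keys := hmem j0 (List.mem_cons_self)
      have hcont : b.contains j0 = true := (PySem.Dict.contains_iff_mem_keys b j0).mpr hj0
      -- the one-step dict
      set b1 := (match PySem.List.pyGet? line.toList j0 with
        | some c => if PySem.Chars.isdigit c then b.modify j0 [] (fun s => s ++ [c]) else b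
        | none => b) with hb1
      have hkeys1 : b1.keys = b.keys := by
        rw [hb1]
        cases h : PySem.List.pyGet? line.toList j0 with
        | none => rfl
        | some c =>
            by_cases hd : PySem.Chars.isdigit c
            · simp only [hd, if_true]
              rw [PySem.Dict.keys_modify, PySem.Dict.keys_insert_of_contains _ _ hcont]
            · simp [hd]
      have hget1self : b1.getD j0 [] = b.getD j0 [] ++ (pvDigitAt line j0).toList := by
        rw [hb1]
        unfold pvDigitAt
        cases h : PySem.List.pyGet? line.toList j0 with
        | none => simp
        | some c =>
            by_cases hd : PySem.Chars.isdigit c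
            · simp only [hd, if_true, Option.toList_some]
              rw [PySem.Dict.getD_modify_self]
            · simp [hd]
      have hget1ne : ∀ j, j ≠ j0 → b1.getD j [] = b.getD j [] := by
        intro j hne
        rw [hb1]
        cases h : PySem.List.pyGet? line.toList j0 with
        | none => rfl
        | some c =>
            by_cases hd : PySem.Chars.isdigit c
            · simp only [hd, if_true]
              rw [PySem.Dict.getD_modify_of_ne _ _ _ hne]
            · simp [hd]
      have hnd' : ks.Nodup := (List.nodup_cons.mp hnd).2
      have hj0nk : j0 ∉ ks := (List.nodup_cons.mp hnd).1
      have hmem' : ∀ j ∈ ks, j ∈ b1.keys := by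
        intro j hj; rw [hkeys1]; exact hmem j (List.mem_cons_of_mem _ hj)
      obtain ⟨hK, hG⟩ := ih b1 hnd' hmem'
      simp only [List.foldl_cons, ← hb1]
      refine ⟨by rw [hK, hkeys1], ?_⟩
      intro j
      rw [hG j]
      by_cases hj : j ∈ ks
      · have hne : j ≠ j0 := fun h => hj0nk (h ▸ hj)
        simp [hj, hne, List.mem_cons, hget1ne j hne]
      · by_cases hjj : j = j0
        · subst hjj
          simp [hj, hget1self]
        · simp [hj, hjj, List.mem_cons, hget1ne j hjj]

-- the whole sweep appends, per key, the digits of the lines at that index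
theorem pvSweep (raw_lines : List String) :
    ∀ (b : PySem.Dict Int (List Char)), b.keys.Nodup →
      (raw_lines.foldl (fun (b : PySem.Dict Int (List Char)) line =>
          b.keys.foldl (fun (b : PySem.Dict Int (List Char)) j =>
            match PySem.List.pyGet? line.toList j with
            | some c => if PySem.Chars.isdigit c then b.modify j [] (fun s => s ++ [c]) else b
            | none => b) b) b).keys = b.keys
      ∧ ∀ j ∈ b.keys,
        (raw_lines.foldl (fun (b : PySem.Dict Int (List Char)) line =>
          b.keys.foldl (fun (b : PySem.Dict Int (List Char)) j =>
            match PySem.List.pyGet? line.toList j with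
            | some c => if PySem.Chars.isdigit c then b.modify j [] (fun s => s ++ [c]) else b
            | none => b) b) b).getD j []
        = b.getD j [] ++ raw_lines.filterMap (fun line => pvDigitAt line j) := by
  induction raw_lines with
  | nil => intro b _; exact ⟨rfl, by intro j _; simp⟩
  | cons line lines ih =>
      intro b hnd
      obtain ⟨hK1, hG1⟩ := pvInner line b.keys b hnd (fun _ h => h)
      set b1 := (b.keys.foldl (fun (b : PySem.Dict Int (List Char)) j =>
          match PySem.List.pyGet? line.toList j with
          | some c => if PySem.Chars.isdigit c then b.modify j [] (fun s => s ++ [c]) else b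
          | none => b) b) with hb1
      have hnd1 : b1.keys.Nodup := by rw [hK1]; exact hnd
      obtain ⟨hK2, hG2⟩ := ih b1 hnd1
      simp only [List.foldl_cons, ← hb1]
      refine ⟨by rw [hK2, hK1], ?_⟩
      intro j hj
      rw [hG2 j (by rw [hK1]; exact hj), hG1 j]
      simp only [hj, if_true]
      rw [List.filterMap_cons]
      cases h : pvDigitAt line j with
      | none => simp
      | some c => simp

-- replace by "" of a character that does not occur is the identity
theorem pvReplaceGo_no_nl : ∀ (fuel : Nat) (l acc : List Char), '\n' ∉ l →
    PySem.Chars.replace.go ['\n'] [] fuel l acc = acc.reverse ++ l := by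
  intro fuel
  induction fuel with
  | zero => intro l acc _; rfl
  | succ fuel ih =>
      intro l acc h
      cases l with
      | nil => simp [PySem.Chars.replace.go]
      | cons ch t =>
          have hch : ('\n' == ch) = false := by
        
            simp only [beq_eq_false_iff_ne, ne_eq]
            intro hc; exact h (by simp [← hc])
          have ht : '\n' ∉ t := fun hh => h (List.mem_cons_of_mem _ hh)
          show (if List.isPrefixOf ['\n'] (ch :: t) = true then _ else PySem.Chars.replace.go ['\n'] [] fuel t (ch :: acc)) = _
          rw [show List.isPrefixOf ['\n'] (ch :: t) = false by simp [List.isPrefixOf, hch]]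
          simp only [Bool.false_eq_true, if_false]
          rw [ih t (ch :: acc) ht]
          simp

theorem pvReplace_no_nl (s : List Char) (h : '\n' ∉ s) :
    PySem.Chars.replace s ['\n'] [] = s := by
  show (if (['\n'] : List Char).isEmpty = true then _ else PySem.Chars.replace.go ['\n'] [] s.length s []) = s
  rw [show (['\n'] : List Char).isEmpty = false from rfl]
  simp only [Bool.false_eq_true, if_false]
  rw [pvReplaceGo_no_nl s.length s [] h]
  simp

-- the Python index c+i of a full-width field resolves to (clamped start) + i
theorem pvClamp_idx (n : Nat) (c w : Int) (hw : 0 < w)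
    (hb : w.toNat ≤ PySem.List.clampIdx n (c + w) - PySem.List.clampIdx n c)
    (hn : PySem.List.clampIdx n c + w.toNat ≤ n)
    (i : Nat) (hi : (i : Int) < w) :
    PySem.List.pyIdx? n (c + (i : Int)) = some (PySem.List.clampIdx n c + i) := by
  have hble := PySem.List.clampIdx_le n (c + w)
  have hale := PySem.List.clampIdx_le n c
  unfold PySem.List.clampIdx at *
  unfold PySem.List.pyIdx?
  split_ifs at * <;> first | (exfalso; omega) | (congr 1; omega)

-- indexing a full-width slice = indexing the list at the shifted Python index
theorem pvSlice_pyGet (l : List Char) (c w : Int) (hw : 0 < w)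
    (hlen : (PySem.List.slice l (some c) (some (c + w))).length = w.toNat)
    (i : Nat) (hi : (i : Int) < w) :
    PySem.List.pyGet? l (c + (i : Int))
      = PySem.List.pyGet? (PySem.List.slice l (some c) (some (c + w))) (i : Int) := by
  have hL := PySem.List.length_slice l c (c + w)
  have hble := PySem.List.clampIdx_le l.length (c + w)
  have hale := PySem.List.clampIdx_le l.length c
  have hwpos : 0 < w.toNat := by omega
  have hba : w.toNat ≤ PySem.List.clampIdx l.length (c + w) - PySem.List.clampIdx l.length c := by omega
  have hn : PySem.List.clampIdx l.length c + w.toNat ≤ l.length := by omega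
  have hidx := pvClamp_idx l.length c w hw hba hn i hi
  have hslice : PySem.List.slice l (some c) (some (c + w))
      = (l.drop (PySem.List.clampIdx l.length c)).take
          (PySem.List.clampIdx l.length (c + w) - PySem.List.clampIdx l.length c) := rfl
  have hridx : PySem.List.pyIdx? (PySem.List.slice l (some c) (some (c + w))).length (i : Int) = some i := by
    unfold PySem.List.pyIdx?
    rw [hlen]
    split_ifs <;> first | (exfalso; omega) | simp
  show (PySem.List.pyIdx? l.length (c + (i : Int))).bind (fun k => l[k]?)
      = (PySem.List.pyIdx? (PySem.List.slice l (some c) (some (c + w))).length (i : Int)).bind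
          (fun k => (PySem.List.slice l (some c) (some (c + w)))[k]?)
  rw [hidx, hridx]
  simp only [Option.bind_some]
  rw [hslice, List.getElem?_take, List.getElem?_drop]
  rw [if_pos (by omega)]

-- ascending unit ranges as mapped List.range
theorem pvRange_asc (c w : Int) (hw : 0 < w) :
    PySem.List.pyRange c (c + w) = (List.range w.toNat).map (fun k : Nat => c + (k : Int)) := by
  unfold PySem.List.pyRange
  norm_num [show c < c + w by omega]

theorem pvRange_asc0 (w : Int) (hw : 0 < w) :
    PySem.List.pyRange 0 w = (List.range w.toNat).map (fun k : Nat => ((k : Nat) : Int)) := by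
  have := pvRange_asc 0 w hw
  rw [zero_add] at this
  simpa using this

theorem pvRange_nil (c d : Int) (h : d ≤ c) : PySem.List.pyRange c d = [] := by
  unfold PySem.List.pyRange
  norm_num
  omega

-- the crux: one column read straight from the lines = the same column read from its stripped slices
theorem pvColBG (raw_lines : List String) (op : String) (c w : Int)
    (h : 0 < w → ∀ line ∈ raw_lines,
      (PySem.List.slice line.toList (some c) (some (c + w))).length = w.toNat ∧
      '\n' ∉ PySem.List.slice line.toList (some c) (some (c + w))) :
    pvColG raw_lines (op, PySem.List.pyRange c (c + w)) = pvColB raw_lines ((op, c), w) := by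
  by_cases hw : 0 < w
  · unfold pvColG pvColB
    simp only
    have hnums : (PySem.List.pyRange c (c + w)).map (fun j =>
        (PySem.Int.ofChars? (raw_lines.filterMap (fun line => pvDigitAt line j))).getD 0)
      = (PySem.List.pyRange 0 w).map (fun i =>
        (PySem.Int.ofChars? ((raw_lines.map (fun line =>
            PySem.Chars.replace (PySem.List.slice line.toList (some c) (some (c + w))) ['\n'] [])).filterMap
          (fun f =>
            match PySem.List.pyGet? f i with
            | some ch => if PySem.Chars.isdigit ch then some ch else none
            | none => none))).getD 0) := by
      rw [pvRange_asc c w hw, pvRange_asc0 w hw, List.map_map, List.map_map]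
      apply List.map_congr_left
      intro k hk
      have hkw : (k : Int) < w := by
        have := List.mem_range.mp hk
        omega
      simp only [Function.comp_def]
      congr 1
      congr 1
      rw [List.filterMap_map]
      apply List.filterMap_congr
      intro line hline
      obtain ⟨hlen, hnl⟩ := h hw line hline
      simp only [Function.comp_def, pvReplace_no_nl _ hnl]
      unfold pvDigitAt
      rw [pvSlice_pyGet line.toList c w hw hlen k hkw]
    rw [hnums]
  · have h1 := pvRange_nil c (c + w) (by omega)
    have h2 := pvRange_nil 0 w (by omega)
    unfold pvColG pvColB
    simp [h1, h2]

-- column-by-column equality of the two sum decompositions, threading the offset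
theorem pvMaps_eq (raw_lines : List String) :
    ∀ (ops : List String) (ws : List Int) (c : Int),
      pvColsOK ops ws c raw_lines = true →
      (pvCols (ops.zip ws) c).map (pvColG raw_lines)
        = ((ops.zip (pvOffs ws c)).zip ws).map (pvColB raw_lines) := by
  intro ops
  induction ops with
  | nil => intro ws c _; simp [pvCols]
  | cons op ops ih =>
      intro ws c h
      cases ws with
      | nil => simp [pvCols]
      | cons w ws =>
          rw [pvColsOK] at h
          rw [Bool.and_eq_true] at h
          obtain ⟨hhead, htail⟩ := h
          simp only [List.zip_cons_cons, pvCols, pvOffs, List.map_cons]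
          rw [ih ws (c + w + 1) htail]
          congr 1
          apply pvColBG
          intro hw line hline
          rw [Bool.or_eq_true, decide_eq_true_eq] at hhead
          rcases hhead with hle | hok
          · omega
          · rw [Bool.and_eq_true] at hok
            have := (List.all_eq_true.mp hok.1) line hline
            rw [Bool.and_eq_true, decide_eq_true_eq, decide_eq_true_eq] at this
            exact this

-- B's port as a sum of per-column contributions over the characterised buffers
theorem pvAlt_eq_sum (operators : List String) (raw_lines : List String) (operand_widths : List Int) :
    solution_part_2_alt operators raw_lines operand_widths
      = ((pvCols (operators.zip operand_widths) 0).map (pvColG raw_lines)).sum := by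
  unfold solution_part_2_alt
  have hcols : ((operators.zip operand_widths).foldl
      (fun (p : List (String × List Int) × Int) ow =>
        (p.1 ++ [(ow.1, PySem.List.pyRange p.2 (p.2 + ow.2))], p.2 + ow.2 + 1))
      (([] : List (String × List Int)), (0 : Int))).1 = pvCols (operators.zip operand_widths) 0 := by
    rw [pvCols_foldl]; simp
  rw [hcols]
  set cols := pvCols (operators.zip operand_widths) 0 with hc
  set buf0 := cols.foldl (fun d col => col.2.foldl (fun d j => d.insert j []) d) PySem.Dict.empty with hb0
  have hnd : buf0.keys.Nodup := pvBuf0_nodup cols PySem.Dict.empty PySem.Dict.nodup_keys_empty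
  have hg0 : ∀ j, buf0.getD j [] = [] := by
    intro j
    exact pvBuf0_getD cols PySem.Dict.empty (fun j' => PySem.Dict.getD_empty j' []) j
  obtain ⟨hK, hG⟩ := pvSweep raw_lines buf0 hnd
  rw [PySem.List.foldl_add]
  rw [zero_add]
  congr 1
  apply List.map_congr_left
  intro col hcol
  have hnums : col.2.map (fun j => (PySem.Int.ofChars? ((raw_lines.foldl
        (fun (b : PySem.Dict Int (List Char)) line =>
          b.keys.foldl (fun (b : PySem.Dict Int (List Char)) j =>
            match PySem.List.pyGet? line.toList j with
            | some c => if PySem.Chars.isdigit c then b.modify j [] (fun s => s ++ [c]) else b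
            | none => b) b) buf0).getD j [])).getD 0)
      = col.2.map (fun j => (PySem.Int.ofChars? (raw_lines.filterMap (fun line => pvDigitAt line j))).getD 0) := by
    apply List.map_congr_left
    intro j hj
    have hjk : j ∈ buf0.keys := pvBuf0_mem cols PySem.Dict.empty col j hcol hj
    rw [hG j hjk, hg0 j, List.nil_append]
  unfold pvColG
  simp only
  rw [hnums]

-- ===== VERDICT =====
theorem solution_part_2_spec : Claim_equal_solution_part_2 := by
  intro operators raw_lines operand_widths _ hpre
  unfold Spec_solution_part_2
  obtain ⟨hne, hcols⟩ := hpre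
  rw [pvA_eq_S operators raw_lines operand_widths hne, pvS_as_sum, pvAlt_eq_sum]
  congr 1
  rw [pvStarts_eq]
  exact (pvMaps_eq raw_lines operators operand_widths 0 hcols).symm
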